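-- pv_equiv track=rewrite | github.com/ld269440877/workspace | quyan/identify_title_excel.py | input_item_res
-- ===== SOURCE A (Python) =====
-- def input_item_res(con_t,input_item):
--     #con—t箱号类型，返回箱号类型的产品列表的字典
--     res_dict = {}
--     for elem in input_item.keys():
--         res_dict[elem] =[]  #初始化
--     for i in range(len(input_item[sorted(input_item.keys())[0]])):
--         if con_t == input_item['Container_Type'][i]:
--             for elem in input_item.keys():
--                 res_dict[elem].append(input_item[elem][i])
--     return  res_dict
-- ===== SOURCE B (Python) =====
-- def input_item_res(con_t, input_item):
--     # group-by: partition all row indices by their container type into buckets,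
--     # then just look up con_t's bucket and extract each column at those indices
--     keys = list(input_item.keys())
--     n = len(input_item[sorted(keys)[0]])
--     ct = input_item['Container_Type']
--     buckets = {}
--     for i in range(n):
--         buckets.setdefault(ct[i], []).append(i)
--     kept = buckets.get(con_t, [])
--     return {k: [input_item[k][i] for i in kept] for k in keys}
-- ===== Notes on version B (the rewrite author's own statement) =====
-- stated objective: alternative
-- what changed: A scans rows and, for each row whose Container_Type equals con_t, appends its cells to every result column; B never compares during the scan: it partitions all row indices into a dict of buckets keyed by container type (setdefault group-by), then looks up con_t's bucket once and extracts each column at those indices.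
-- outside the precondition, e.g. on input_item_res('X', {'a': []}): A returns {'a': []}, B raises KeyError
import Mathlib
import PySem

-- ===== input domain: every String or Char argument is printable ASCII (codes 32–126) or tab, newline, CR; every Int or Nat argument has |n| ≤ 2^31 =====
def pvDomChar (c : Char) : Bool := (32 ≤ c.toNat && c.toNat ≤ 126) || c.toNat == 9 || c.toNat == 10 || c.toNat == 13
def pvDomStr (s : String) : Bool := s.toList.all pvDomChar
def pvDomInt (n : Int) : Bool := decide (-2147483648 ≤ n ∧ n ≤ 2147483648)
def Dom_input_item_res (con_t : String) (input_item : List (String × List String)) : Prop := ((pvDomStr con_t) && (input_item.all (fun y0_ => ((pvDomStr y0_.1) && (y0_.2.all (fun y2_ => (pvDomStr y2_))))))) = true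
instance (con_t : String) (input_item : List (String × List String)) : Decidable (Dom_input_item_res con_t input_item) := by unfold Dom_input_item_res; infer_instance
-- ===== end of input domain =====

-- B groups all row indices by their container type into a bucket dict (no comparison
-- against con_t during the scan) and then looks up con_t's bucket to slice each column,
-- instead of A's row-major filter that appends each matching row to every result column.

-- ===== PORT A =====
def input_item_res (con_t : String) (input_item : List (String × List String)) : List (String × List String) :=
  let d : PySem.Dict String (List String) := PySem.Dict.mk input_item
  let res0 : PySem.Dict String (List String) :=
    d.keys.foldl (fun r k => r.insert k []) PySem.Dict.empty
  let firstKey := PySem.List.pyGetD (PySem.List.sorted d.keys (fun x => x) false) 0 ""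
  let n := (d.getD firstKey []).length
  let res := (PySem.List.pyRange 0 (n : Int) 1).foldl (fun r i =>
      if con_t == PySem.List.pyGetD (d.getD "Container_Type" []) i "" then
        d.keys.foldl (fun r k => r.modify k [] (fun v => v ++ [PySem.List.pyGetD (d.getD k []) i ""])) r
      else r) res0
  res.items

-- ===== PORT B =====
def input_item_res_alt (con_t : String) (input_item : List (String × List String)) : List (String × List String) :=
  let d : PySem.Dict String (List String) := PySem.Dict.mk input_item
  let keys := d.keys
  let n := (d.getD (PySem.List.pyGetD (PySem.List.sorted keys (fun x => x) false) 0 "") []).length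
  let ct := d.getD "Container_Type" []
  -- buckets.setdefault(ct[i], []).append(i)  ==  modify (ct[i]) [] (· ++ [i])
  let buckets : PySem.Dict String (List Int) :=
    (PySem.List.pyRange 0 (n : Int) 1).foldl
      (fun b i => b.modify (PySem.List.pyGetD ct i "") [] (fun v => v ++ [i])) PySem.Dict.empty
  let kept := buckets.getD con_t []
  (keys.foldl
    (fun r k => r.insert k (kept.map (fun i => PySem.List.pyGetD (d.getD k []) i "")))
    (PySem.Dict.empty : PySem.Dict String (List String))).items

-- ===== PRECONDITION & SPEC =====
-- Pre_ excludes exactly the inputs where the Python A raises (empty dict → IndexError;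
-- a 'Container_Type' column shorter than the first sorted key's column, or any column
-- shorter than a matched row index → IndexError); it also excludes association lists with
-- duplicate keys, which cannot arise from a Python dict, and — the one corner where A
-- returns but our B raises KeyError — tables lacking a 'Container_Type' key whose first
-- sorted column is empty (A then skips every lookup and returns the all-empty dict).
def Pre_input_item_res (con_t : String) (input_item : List (String × List String)) : Prop :=
  input_item ≠ [] ∧ (input_item.map (·.1)).Nodup ∧
  "Container_Type" ∈ input_item.map (·.1) ∧
  (let d : PySem.Dict String (List String) := PySem.Dict.mk input_item
   let n := (d.getD (PySem.List.pyGetD (PySem.List.sorted d.keys (fun x => x.toList) false) 0 "") []).length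
   let ct := d.getD "Container_Type" []
   n ≤ ct.length ∧
   ∀ i ∈ List.range n, con_t = PySem.List.pyGetD ct (i : Int) "" →
     ∀ p ∈ input_item, i < p.2.length)
instance (con_t : String) (input_item : List (String × List String)) : Decidable (Pre_input_item_res con_t input_item) := by unfold Pre_input_item_res; infer_instance

def pvWitness_input_item_res : String × (List (String × List String)) :=
  ("20GP", [("Container_Type", ["20GP", "40HQ"]), ("name", ["a", "b"])])

def Spec_input_item_res (con_t : String) (input_item : List (String × List String)) (out : List (String × List String)) : Prop := out = input_item_res_alt con_t input_item
instance (con_t : String) (input_item : List (String × List String)) (out : List (String × List String)) : Decidable (Spec_input_item_res con_t input_item out) := by unfold Spec_input_item_res; infer_instance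

-- ===== CLAIM (what is proved, stated in full; the proofs are below) =====
def Claim_equal_input_item_res : Prop := ∀ (con_t : String) (input_item : List (String × List String)), Dom_input_item_res con_t input_item → Pre_input_item_res con_t input_item → Spec_input_item_res con_t input_item (input_item_res con_t input_item)

-- ===== LEMMAS AND PROOFS =====

-- a modify over a set of keys already present leaves the key list unchanged
theorem pv_keys_foldl_modify (ks : List String) (r : PySem.Dict String (List String))
    (c : String → String)
    (hsub : ∀ k ∈ ks, r.contains k = true) :
    (ks.foldl (fun r k => r.modify k [] (fun v => v ++ [c k])) r).keys = r.keys := by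
  induction ks generalizing r with
  | nil => rfl
  | cons k ks ih =>
    simp only [List.foldl_cons]
    rw [ih]
    · rw [PySem.Dict.keys_modify, PySem.Dict.keys_insert_of_contains _ _ (hsub k (by simp))]
    · intro k' hk'
      rw [PySem.Dict.contains_modify]
      simp [hsub k' (List.mem_cons_of_mem _ hk')]

-- effect of one row-append pass on the entry of a key not in the pass
theorem pv_getD_foldl_modify_notmem (ks : List String) (r : PySem.Dict String (List String))
    (c : String → String) (k : String) (hk : k ∉ ks) :
    (ks.foldl (fun r k' => r.modify k' [] (fun v => v ++ [c k'])) r).getD k [] = r.getD k [] := by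
  induction ks generalizing r with
  | nil => rfl
  | cons k0 ks ih =>
    simp only [List.foldl_cons]
    rw [ih _ (fun h => hk (List.mem_cons_of_mem _ h)),
        PySem.Dict.getD_modify_of_ne _ _ _ (by intro h; exact hk (by rw [h]; exact List.mem_cons_self ..))]

-- effect of one row-append pass on the entry of a key in the pass (keys distinct)
theorem pv_getD_foldl_modify_mem (ks : List String) (r : PySem.Dict String (List String))
    (c : String → String) (k : String) (hnd : ks.Nodup) (hk : k ∈ ks) :
    (ks.foldl (fun r k' => r.modify k' [] (fun v => v ++ [c k'])) r).getD k []
      = r.getD k [] ++ [c k] := by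
  induction ks generalizing r with
  | nil => cases hk
  | cons k0 ks ih =>
    simp only [List.foldl_cons]
    rcases List.mem_cons.mp hk with h | h
    · subst h
      rw [pv_getD_foldl_modify_notmem _ _ _ _ (by simpa using (List.nodup_cons.mp hnd).1),
          PySem.Dict.getD_modify, if_pos rfl]
    · rw [ih _ (List.nodup_cons.mp hnd).2 h,
          PySem.Dict.getD_modify_of_ne _ _ _
            (by intro he; exact (List.nodup_cons.mp hnd).1 (by rw [← he]; exact h))]

-- the whole row loop: entry at k collects the cells of the rows passing the filter
theorem pv_getD_row_loop (L : List Int) (ks : List String) (hnd : ks.Nodup)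
    (r : PySem.Dict String (List String))
    (cond : Int → Bool) (cell : String → Int → String) (k : String) (hk : k ∈ ks)
    (hkeys : ∀ k' ∈ ks, r.contains k' = true) :
    (L.foldl (fun r i =>
        if cond i then ks.foldl (fun r k' => r.modify k' [] (fun v => v ++ [cell k' i])) r
        else r) r).getD k []
      = r.getD k [] ++ (L.filter cond).map (cell k) := by
  induction L generalizing r with
  | nil => simp
  | cons i L ih =>
    simp only [List.foldl_cons, List.filter_cons]
    by_cases hc : cond i
    · rw [if_pos hc, if_pos hc, ih]
      · rw [pv_getD_foldl_modify_mem ks r _ k hnd hk]; simp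
      · intro k' hk'
        have h1 : (ks.foldl (fun r k' => r.modify k' [] (fun v => v ++ [cell k' i])) r).keys = r.keys :=
          pv_keys_foldl_modify ks r _ hkeys
        rw [PySem.Dict.contains_iff_mem_keys, h1, ← PySem.Dict.contains_iff_mem_keys]
        exact hkeys k' hk'
    · rw [if_neg hc, if_neg hc, ih _ hkeys]

-- the row loop keeps the key list
theorem pv_keys_row_loop (L : List Int) (ks : List String)
    (r : PySem.Dict String (List String))
    (cond : Int → Bool) (cell : String → Int → String)
    (hkeys : ∀ k' ∈ ks, r.contains k' = true) :
    (L.foldl (fun r i =>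
        if cond i then ks.foldl (fun r k' => r.modify k' [] (fun v => v ++ [cell k' i])) r
        else r) r).keys = r.keys := by
  induction L generalizing r with
  | nil => rfl
  | cons i L ih =>
    simp only [List.foldl_cons]
    by_cases hc : cond i
    · rw [if_pos hc, ih, pv_keys_foldl_modify ks r _ hkeys]
      intro k' hk'
      rw [PySem.Dict.contains_iff_mem_keys, pv_keys_foldl_modify ks r _ hkeys,
          ← PySem.Dict.contains_iff_mem_keys]
      exact hkeys k' hk'
    · rw [if_neg hc, ih _ hkeys]

-- initialisation: a fresh-insert loop of [] over distinct keys
theorem pv_res0_items (ks : List String) (hnd : ks.Nodup) :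
    ((ks.foldl (fun r k => r.insert k []) (PySem.Dict.empty : PySem.Dict String (List String))).items)
      = ks.map (fun k => (k, ([] : List String))) := by
  have := PySem.Dict.items_foldl_insert_fresh (d := (PySem.Dict.empty : PySem.Dict String (List String)))
      ks (fun k => k) (fun _ => ([] : List String)) (by intro a _; rfl) (by simpa using hnd)
  simpa using this

-- B's group-by pass: con_t's bucket is exactly the filtered index list
theorem pv_bucket_getD (L : List Int) (ctv : Int → String) (con_t : String) :
    ((L.foldl (fun b i => b.modify (ctv i) [] (fun v => v ++ [i]))
        (PySem.Dict.empty : PySem.Dict String (List Int))).getD con_t [])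
      = L.filter (fun i => con_t == ctv i) := by
  have h : (L.foldl (fun b i => b.modify (ctv i) [] (fun v => v ++ [i]))
        (PySem.Dict.empty : PySem.Dict String (List Int)))
      = (L.map (fun i => (ctv i, i))).foldl (fun b p => b.modify p.1 [] (fun v => v ++ [p.2]))
        PySem.Dict.empty := by
    rw [List.foldl_map]
  rw [h, PySem.Dict.getD_foldl_modify_append]
  rw [List.filter_map]
  simp only [Function.comp_def]
  rw [List.map_map]
  have : ∀ i, ((ctv i, i).1 == con_t) = (con_t == ctv i) := by
    intro i; simp [eq_comm]
  simp only [this]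
  simp [Function.comp_def]

-- ===== VERDICT (by name: the statement is the Claim_ definition above) =====

theorem input_item_res_spec : Claim_equal_input_item_res := by
  unfold Claim_equal_input_item_res
  intro con_t input_item _ hpre
  obtain ⟨_, hnd, _, _⟩ := hpre
  unfold Spec_input_item_res input_item_res input_item_res_alt
  simp only []
  set d : PySem.Dict String (List String) := PySem.Dict.mk input_item with hd
  have hknd : d.keys.Nodup := by simpa [hd, PySem.Dict.keys_mk] using hnd
  set ks := d.keys with hks
  set n := (d.getD (PySem.List.pyGetD (PySem.List.sorted ks (fun x => x) false) 0 "") []).length with hn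
  set cond : Int → Bool := fun i => con_t == PySem.List.pyGetD (d.getD "Container_Type" []) i ""
    with hcond
  set cell : String → Int → String := fun k i => PySem.List.pyGetD (d.getD k []) i "" with hcell
  set res0 : PySem.Dict String (List String) :=
    ks.foldl (fun r k => r.insert k []) PySem.Dict.empty with hres0
  have hres0items : res0.items = ks.map (fun k => (k, ([] : List String))) :=
    pv_res0_items ks hknd
  have hres0keys : res0.keys = ks := by
    show res0.items.map (·.1) = ks
    rw [hres0items]; simp [Function.comp_def]
  have hres0contains : ∀ k ∈ ks, res0.contains k = true := by
    intro k hk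
    rw [PySem.Dict.contains_iff_mem_keys, hres0keys]; exact hk
  have hres0getD : ∀ k ∈ ks, res0.getD k [] = [] := by
    intro k hk
    exact PySem.Dict.getD_of_mem_items _ (by rw [hres0items]; exact List.mem_map_of_mem hk)
      (by rw [hres0keys]; exact hknd) []
  set L := PySem.List.pyRange 0 (n : Int) 1 with hL
  set res := L.foldl (fun r i =>
      if cond i then ks.foldl (fun r k => r.modify k [] (fun v => v ++ [cell k i])) r
      else r) res0 with hres
  have hreskeys : res.keys = ks := by
    rw [hres, pv_keys_row_loop L ks res0 cond cell hres0contains, hres0keys]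
  have hresnd : res.keys.Nodup := by rw [hreskeys]; exact hknd
  have hkept : ((L.foldl (fun b i =>
        b.modify (PySem.List.pyGetD (d.getD "Container_Type" []) i "") [] (fun v => v ++ [i]))
        (PySem.Dict.empty : PySem.Dict String (List Int))).getD con_t [])
      = L.filter cond := by
    rw [pv_bucket_getD L (fun i => PySem.List.pyGetD (d.getD "Container_Type" []) i "") con_t]
  rw [PySem.Dict.items_eq_map_keys res hresnd [], hreskeys]
  rw [hkept]
  rw [PySem.Dict.items_foldl_insert_fresh ks (fun k => k)
        (fun k => (L.filter cond).map (cell k)) PySem.Dict.empty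
        (by intro a _; rfl) (by simpa using hknd)]
  simp only [show (PySem.Dict.empty : PySem.Dict String (List String)).items = [] from rfl, List.nil_append]
  apply List.map_congr_left
  intro k hk
  rw [hres, pv_getD_row_loop L ks hknd res0 cond cell k hk hres0contains, hres0getD k hk]
  simp
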